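-- pv_equiv track=rewrite | github.com/psytec1x/CYDMIDI | midi_circuit_tracks.py | encode_7bit
-- ===== SOURCE A (Python) =====
-- def encode_7bit(data):
--     """8-Bit Daten zu 7-Bit SysEx-Format kodieren"""
--     encoded = []
--     bit_buffer = 0
--     bits_in_buffer = 0
--
--     for byte in data:
--         for bit in range(8):
--             bit_buffer = (bit_buffer << 1) | ((byte >> bit) & 1)
--             bits_in_buffer += 1
--
--             if bits_in_buffer == 7:
--                 encoded.append(bit_buffer)
--                 bit_buffer = 0
--                 bits_in_buffer = 0
--
--     return encoded
-- ===== SOURCE B (Python) =====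
-- def encode_7bit(data):
--     """8-Bit Daten zu 7-Bit SysEx-Format kodieren"""
--     # Phase 1: flatten every byte into its bits, LSB first.
--     bits = [(byte >> k) & 1 for byte in data for k in range(8)]
--     # Phase 2: each complete group of 7 bits becomes one value, first bit = MSB;
--     # trailing bits that do not fill a group are dropped.
--     return [bits[i] * 64 + bits[i + 1] * 32 + bits[i + 2] * 16 + bits[i + 3] * 8
--             + bits[i + 4] * 4 + bits[i + 5] * 2 + bits[i + 6]
--             for i in range(0, len(bits) - 6, 7)]
-- ===== Notes on version B (the rewrite author's own statement) =====
-- stated objective: alternative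
-- what changed: A streams bits through a stateful (bit_buffer, bits_in_buffer) accumulator that flushes every 7th bit; B instead flattens all bytes into one flat bit list and then reads each complete 7-bit group off with a direct positional shift/add formula, dropping incomplete trailing bits implicitly.
import Mathlib
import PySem

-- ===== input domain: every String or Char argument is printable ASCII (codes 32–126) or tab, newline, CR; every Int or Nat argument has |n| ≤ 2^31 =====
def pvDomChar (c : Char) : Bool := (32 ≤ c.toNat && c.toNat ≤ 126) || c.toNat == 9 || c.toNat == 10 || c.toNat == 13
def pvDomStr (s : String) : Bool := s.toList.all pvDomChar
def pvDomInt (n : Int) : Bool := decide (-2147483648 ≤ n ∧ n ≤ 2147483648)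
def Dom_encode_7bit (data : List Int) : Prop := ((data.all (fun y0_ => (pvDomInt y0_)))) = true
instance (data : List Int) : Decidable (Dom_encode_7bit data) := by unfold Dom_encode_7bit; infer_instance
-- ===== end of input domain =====

-- B replaces A's streaming bit-buffer accumulator by two passes (flatten all bits, then
-- read each complete 7-bit group off by a direct positional formula); objective: alternative.

-- ===== PORT A =====
-- state st = (encoded, bit_buffer, bits_in_buffer); '(byte >> bit) & 1' and
-- '(bit_buffer << 1) | …' use Lean's '>>>'/'<<<' and PySem.Int.band/bor (Python-exact;
-- 'bit' from range(8) is nonnegative, so '.toNat' of it is exact).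
def encode_7bit (data : List Int) : List Int :=
  (data.foldl (fun (st : List Int × Int × Int) (byte : Int) =>
      (PySem.List.pyRange 0 8 1).foldl (fun (st : List Int × Int × Int) (bit : Int) =>
        let bit_buffer := PySem.Int.bor (st.2.1 <<< (1 : Nat)) (PySem.Int.band (byte >>> bit.toNat) 1)
        let bits_in_buffer := st.2.2 + 1
        if bits_in_buffer = 7 then (st.1 ++ [bit_buffer], 0, 0)
        else (st.1, bit_buffer, bits_in_buffer)) st)
    (([] : List Int), (0 : Int), (0 : Int))).1

-- ===== PORT B =====
-- B-side helper: the inner part of Source B's comprehension, the 8 bits of one byte (LSB first)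
def pvB7bits (byte : Int) : List Int :=
  (PySem.List.pyRange 0 8 1).map (fun (k : Int) => PySem.Int.band (byte >>> k.toNat) 1)

-- Source B: bits = [(byte >> k) & 1 for byte in data for k in range(8)]; then one value per
-- index i in range(0, len(bits) - 6, 7).  Indices i..i+6 are always in range, so
-- pyGetD's default 0 is never used.
def encode_7bit_alt (data : List Int) : List Int :=
  let bits := data.flatMap pvB7bits
  (PySem.List.pyRange 0 ((bits.length : Int) - 6) 7).map (fun i =>
    PySem.List.pyGetD bits i 0 * 64 + PySem.List.pyGetD bits (i + 1) 0 * 32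
    + PySem.List.pyGetD bits (i + 2) 0 * 16 + PySem.List.pyGetD bits (i + 3) 0 * 8
    + PySem.List.pyGetD bits (i + 4) 0 * 4 + PySem.List.pyGetD bits (i + 5) 0 * 2
    + PySem.List.pyGetD bits (i + 6) 0)

-- ===== PRECONDITION & SPEC =====
def Spec_encode_7bit (data : List Int) (out : List Int) : Prop := out = encode_7bit_alt data
instance (data : List Int) (out : List Int) : Decidable (Spec_encode_7bit data out) := by unfold Spec_encode_7bit; infer_instance

-- ===== CLAIM (what is proved, stated in full; the proofs are below) =====
def Claim_equal_encode_7bit : Prop := ∀ (data : List Int), Dom_encode_7bit data → Spec_encode_7bit data (encode_7bit data)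

-- ===== LEMMAS AND PROOFS =====

-- A's per-bit step, on state (encoded, bit_buffer, bits_in_buffer)
def pvStep (st : List Int × Int × Int) (b : Int) : List Int × Int × Int :=
  let bit_buffer := PySem.Int.bor (st.2.1 <<< (1 : Nat)) b
  let bits_in_buffer := st.2.2 + 1
  if bits_in_buffer = 7 then (st.1 ++ [bit_buffer], 0, 0)
  else (st.1, bit_buffer, bits_in_buffer)

-- reference chunking: one value per complete leading group of 7 bits
def pvChunks (bs : List Int) : List Int :=
  if h : 7 ≤ bs.length then
    (bs.getD 0 0 * 64 + bs.getD 1 0 * 32 + bs.getD 2 0 * 16 + bs.getD 3 0 * 8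
     + bs.getD 4 0 * 4 + bs.getD 5 0 * 2 + bs.getD 6 0) :: pvChunks (bs.drop 7)
  else []
termination_by bs.length
decreasing_by simp; omega

def pvGN (bs : List Int) (k : Nat) : Int :=
  bs.getD (7*k) 0 * 64 + bs.getD (7*k+1) 0 * 32 + bs.getD (7*k+2) 0 * 16
  + bs.getD (7*k+3) 0 * 8 + bs.getD (7*k+4) 0 * 4 + bs.getD (7*k+5) 0 * 2
  + bs.getD (7*k+6) 0

theorem pv_step_bor (buf b : Int) (hbuf : 0 ≤ buf) (hb : b = 0 ∨ b = 1) :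
    PySem.Int.bor (buf <<< (1 : Nat)) b = 2*buf + b := by
  have hs : buf <<< (1 : Nat) = 2*buf := by rw [Int.shiftLeft_eq']; ring
  rcases hb with rfl | rfl
  · simp [hs]
  · rw [hs, PySem.Int.bor_of_nonneg (by omega) (by omega)]
    have h := Nat.lor_bit false buf.toNat true 0
    simp [Nat.bit] at h
    have h2 : (2*buf).toNat = 2*buf.toNat := by omega
    rw [h2]
    simp only [Int.toNat_one]
    omega

theorem pvStep_eq (enc : List Int) (buf n b : Int) (h7 : n + 1 ≠ 7) :
    pvStep (enc, buf, n) b = (enc, PySem.Int.bor (buf <<< (1 : Nat)) b, n + 1) := by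
  simp only [pvStep]
  rw [if_neg h7]

theorem pvStep_flush (enc : List Int) (buf n b : Int) (h7 : n + 1 = 7) :
    pvStep (enc, buf, n) b = (enc ++ [PySem.Int.bor (buf <<< (1 : Nat)) b], 0, 0) := by
  simp only [pvStep]
  rw [if_pos h7]

theorem pvFoldStep_lt7 : ∀ (bs : List Int) (enc : List Int) (buf n : Int),
    n + bs.length < 7 → (bs.foldl pvStep (enc, buf, n)).1 = enc := by
  intro bs
  induction bs with
  | nil => intro enc buf n _; rfl
  | cons b bs ih =>
    intro enc buf n h
    simp only [List.length_cons] at h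
    simp only [List.foldl]
    rw [pvStep_eq enc buf n b (by omega)]
    exact ih enc _ (n + 1) (by push_cast at h ⊢; omega)

theorem pvFold_chunks : ∀ (bs : List Int), (∀ b ∈ bs, b = 0 ∨ b = 1) → ∀ (enc : List Int),
    (bs.foldl pvStep (enc, 0, 0)).1 = enc ++ pvChunks bs
  | b0::b1::b2::b3::b4::b5::b6::rest => fun h enc => by
    have h0 := h b0 (by simp); have h1 := h b1 (by simp); have h2 := h b2 (by simp)
    have h3 := h b3 (by simp); have h4 := h b4 (by simp); have h5 := h b5 (by simp)
    have h6 := h b6 (by simp)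
    have c0 : 0 ≤ b0 ∧ b0 ≤ 1 := by rcases h0 with rfl | rfl <;> norm_num
    have c1 : 0 ≤ b1 ∧ b1 ≤ 1 := by rcases h1 with rfl | rfl <;> norm_num
    have c2 : 0 ≤ b2 ∧ b2 ≤ 1 := by rcases h2 with rfl | rfl <;> norm_num
    have c3 : 0 ≤ b3 ∧ b3 ≤ 1 := by rcases h3 with rfl | rfl <;> norm_num
    have c4 : 0 ≤ b4 ∧ b4 ≤ 1 := by rcases h4 with rfl | rfl <;> norm_num
    have c5 : 0 ≤ b5 ∧ b5 ≤ 1 := by rcases h5 with rfl | rfl <;> norm_num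
    simp only [List.foldl]
    rw [pvStep_eq _ _ _ b0 (by norm_num), pvStep_eq _ _ _ b1 (by norm_num),
        pvStep_eq _ _ _ b2 (by norm_num), pvStep_eq _ _ _ b3 (by norm_num),
        pvStep_eq _ _ _ b4 (by norm_num), pvStep_eq _ _ _ b5 (by norm_num),
        pvStep_flush _ _ _ b6 (by norm_num)]
    rw [pv_step_bor 0 b0 le_rfl h0,
        pv_step_bor (2*0 + b0) b1 (by omega) h1,
        pv_step_bor (2*(2*0 + b0) + b1) b2 (by omega) h2,
        pv_step_bor (2*(2*(2*0 + b0) + b1) + b2) b3 (by omega) h3,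
        pv_step_bor (2*(2*(2*(2*0 + b0) + b1) + b2) + b3) b4 (by omega) h4,
        pv_step_bor (2*(2*(2*(2*(2*0 + b0) + b1) + b2) + b3) + b4) b5 (by omega) h5,
        pv_step_bor (2*(2*(2*(2*(2*(2*0 + b0) + b1) + b2) + b3) + b4) + b5) b6 (by omega) h6]
    rw [pvFold_chunks rest (fun b hb => h b (by simp [hb])) _]
    have hc : pvChunks (b0::b1::b2::b3::b4::b5::b6::rest)
        = (b0*64 + b1*32 + b2*16 + b3*8 + b4*4 + b5*2 + b6) :: pvChunks rest := by
      rw [pvChunks.eq_def, dif_pos (by simp)]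
      simp [List.getD]
    rw [hc]
    simp only [List.append_assoc, List.singleton_append]
    congr 2
    ring
  | [] => fun _ enc => by rw [pvFoldStep_lt7 _ enc 0 0 (by simp)]; simp [pvChunks]
  | [b0] => fun _ enc => by rw [pvFoldStep_lt7 _ enc 0 0 (by simp)]; simp [pvChunks]
  | [b0, b1] => fun _ enc => by rw [pvFoldStep_lt7 _ enc 0 0 (by simp)]; simp [pvChunks]
  | [b0, b1, b2] => fun _ enc => by rw [pvFoldStep_lt7 _ enc 0 0 (by simp)]; simp [pvChunks]
  | [b0, b1, b2, b3] => fun _ enc => by rw [pvFoldStep_lt7 _ enc 0 0 (by simp)]; simp [pvChunks]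
  | [b0, b1, b2, b3, b4] => fun _ enc => by rw [pvFoldStep_lt7 _ enc 0 0 (by simp)]; simp [pvChunks]
  | [b0, b1, b2, b3, b4, b5] => fun _ enc => by rw [pvFoldStep_lt7 _ enc 0 0 (by simp)]; simp [pvChunks]

theorem pvEncA (data : List Int) : ∀ (st : List Int × Int × Int),
    data.foldl (fun st byte =>
      (PySem.List.pyRange 0 8 1).foldl (fun st bit =>
        pvStep st (PySem.Int.band (byte >>> bit.toNat) 1)) st) st
    = (data.flatMap pvB7bits).foldl pvStep st := by
  induction data with
  | nil => intro st; simp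
  | cons byte rest ih =>
    intro st
    simp only [List.foldl, List.flatMap_cons, List.foldl_append]
    rw [← ih]
    congr 1

theorem pvRangeEq (bits : List Int) :
    (PySem.List.pyRange 0 ((bits.length : Int) - 6) 7).map (fun i =>
      PySem.List.pyGetD bits i 0 * 64 + PySem.List.pyGetD bits (i + 1) 0 * 32
      + PySem.List.pyGetD bits (i + 2) 0 * 16 + PySem.List.pyGetD bits (i + 3) 0 * 8
      + PySem.List.pyGetD bits (i + 4) 0 * 4 + PySem.List.pyGetD bits (i + 5) 0 * 2
      + PySem.List.pyGetD bits (i + 6) 0)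
    = (List.range (bits.length / 7)).map (pvGN bits) := by
  rw [PySem.List.pyRange_of_pos 0 _ (by norm_num)]
  rw [List.map_map]
  have hN : (if (0 : Int) < (bits.length : Int) - 6
      then (((bits.length : Int) - 6 - 0 + 7 - 1) / 7).toNat else 0) = bits.length / 7 := by
    split <;> omega
  rw [hN]
  apply List.map_congr_left
  intro k _
  have i0 : (0 : Int) + 7*(k : Int) = ((7*k : Nat) : Int) := by push_cast; ring
  have i1 : ((7*k : Nat) : Int) + 1 = ((7*k+1 : Nat) : Int) := by push_cast; ring
  have i2 : ((7*k : Nat) : Int) + 2 = ((7*k+2 : Nat) : Int) := by push_cast; ring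
  have i3 : ((7*k : Nat) : Int) + 3 = ((7*k+3 : Nat) : Int) := by push_cast; ring
  have i4 : ((7*k : Nat) : Int) + 4 = ((7*k+4 : Nat) : Int) := by push_cast; ring
  have i5 : ((7*k : Nat) : Int) + 5 = ((7*k+5 : Nat) : Int) := by push_cast; ring
  have i6 : ((7*k : Nat) : Int) + 6 = ((7*k+6 : Nat) : Int) := by push_cast; ring
  simp only [Function.comp]
  rw [i0, i1, i2, i3, i4, i5, i6]
  simp only [PySem.List.pyGetD_natCast]
  rfl

theorem pvGnChunks (bs : List Int) :
    (List.range (bs.length / 7)).map (pvGN bs) = pvChunks bs := by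
  by_cases h : 7 ≤ bs.length
  · have hL : bs.length / 7 = (bs.drop 7).length / 7 + 1 := by simp; omega
    rw [hL, List.range_succ_eq_map, List.map_cons, List.map_map,
        pvChunks.eq_def, dif_pos h]
    refine congrArg₂ List.cons ?_ ?_
    · norm_num [pvGN]
    · rw [← pvGnChunks (bs.drop 7)]
      apply List.map_congr_left
      intro k _
      have hd : ∀ (m : Nat), (bs.drop 7).getD m 0 = bs.getD (7 + m) 0 := by
        intro m; simp [List.getD_eq_getElem?_getD, List.getElem?_drop]
      simp only [Function.comp, pvGN, hd, Nat.succ_eq_add_one]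
      rw [show 7*(k+1) = 7 + 7*k from by ring]
      simp only [Nat.add_assoc]
  · have h0 : bs.length / 7 = 0 := by omega
    rw [h0, pvChunks.eq_def, dif_neg h]
    rfl
termination_by bs.length
decreasing_by simp; omega

theorem pvAltEq (data : List Int) :
    encode_7bit_alt data = pvChunks (data.flatMap pvB7bits) := by
  simp only [encode_7bit_alt]
  exact (pvRangeEq (data.flatMap pvB7bits)).trans (pvGnChunks _)

theorem pvBitsBool (data : List Int) : ∀ b ∈ data.flatMap pvB7bits, b = 0 ∨ b = 1 := by
  intro b hb
  rw [List.mem_flatMap] at hb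
  obtain ⟨byte, _, hmem⟩ := hb
  unfold pvB7bits at hmem
  rw [List.mem_map] at hmem
  obtain ⟨k, _, rfl⟩ := hmem
  rw [PySem.Int.band_one]
  exact PySem.Int.mod_two_eq _

-- ===== VERDICT (by name: the statement is the Claim_ definition above) =====
theorem encode_7bit_spec : Claim_equal_encode_7bit := by
  intro data _
  unfold Spec_encode_7bit
  have hA : encode_7bit data = ((data.flatMap pvB7bits).foldl pvStep ([], 0, 0)).1 :=
    congrArg Prod.fst (pvEncA data ([], 0, 0))
  rw [hA, pvFold_chunks _ (pvBitsBool data) [], pvAltEq]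
  simp
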